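-- pv_equiv track=rewrite | github.com/RichardBricio/dotahubbot | medals.py | get_medal
-- ===== SOURCE A (Python) =====
-- def get_medal(mmr):
--     tiers = [
--         (800, "Herald"),
--         (1000, "Guardian"),
--         (1200, "Crusader"),
--         (1500, "Archon"),
--         (1800, "Legend"),
--         (2200, "Ancient"),
--         (2600, "Divine"),
--     ]
--     for value, name in tiers:
--         if mmr < value:
--             return name
--     return "Immortal"
-- ===== SOURCE B (Python) =====
-- import bisect
--
-- _THRESHOLDS = [800, 1000, 1200, 1500, 1800, 2200, 2600]
-- _NAMES = ["Herald", "Guardian", "Crusader", "Archon",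
--           "Legend", "Ancient", "Divine", "Immortal"]
--
-- def get_medal(mmr):
--     return _NAMES[bisect.bisect_right(_THRESHOLDS, mmr)]
-- ===== Notes on version B (the rewrite author's own statement) =====
-- stated objective: idiomatic
-- what changed: Replaced the linear scan over (threshold, name) pairs with a binary search: names[bisect.bisect_right(thresholds, mmr)] over a sorted threshold list and a parallel names list.
import Mathlib
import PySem

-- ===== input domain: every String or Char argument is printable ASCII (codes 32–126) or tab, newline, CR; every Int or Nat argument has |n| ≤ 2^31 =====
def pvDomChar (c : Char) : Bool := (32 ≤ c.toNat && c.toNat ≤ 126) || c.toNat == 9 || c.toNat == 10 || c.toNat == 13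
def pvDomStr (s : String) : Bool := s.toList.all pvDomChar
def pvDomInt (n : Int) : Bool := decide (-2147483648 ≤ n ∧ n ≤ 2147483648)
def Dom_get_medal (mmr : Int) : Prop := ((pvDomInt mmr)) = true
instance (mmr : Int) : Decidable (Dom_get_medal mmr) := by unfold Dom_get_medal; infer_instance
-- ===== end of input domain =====

-- B replaces A's linear scan over (threshold, name) pairs with bisect_right on a sorted
-- threshold list and a parallel names list (objective: idiomatic).

-- ===== PORT A =====
def pvTiersA : List (Int × String) :=
  [(800, "Herald"), (1000, "Guardian"), (1200, "Crusader"), (1500, "Archon"),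
   (1800, "Legend"), (2200, "Ancient"), (2600, "Divine")]

def pvScanA (mmr : Int) : List (Int × String) → String
  | [] => "Immortal"
  | (value, name) :: rest => if mmr < value then name else pvScanA mmr rest

def get_medal (mmr : Int) : String := pvScanA mmr pvTiersA

-- ===== PORT B =====
def pvThresholdsB : List Int := [800, 1000, 1200, 1500, 1800, 2200, 2600]
def pvNamesB : List String :=
  ["Herald", "Guardian", "Crusader", "Archon", "Legend", "Ancient", "Divine", "Immortal"]

def get_medal_alt (mmr : Int) : String :=
  pvNamesB.getD (PySem.List.bisectRight pvThresholdsB mmr) "Immortal"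

-- ===== PRECONDITION & SPEC =====
def Spec_get_medal (mmr : Int) (out : String) : Prop := out = get_medal_alt mmr
instance (mmr : Int) (out : String) : Decidable (Spec_get_medal mmr out) := by unfold Spec_get_medal; infer_instance

-- ===== CLAIM (what is proved, stated in full; the proofs are below) =====
def Claim_equal_get_medal : Prop := ∀ (mmr : Int), Dom_get_medal mmr → Spec_get_medal mmr (get_medal mmr)

-- ===== LEMMAS AND PROOFS =====

-- ===== VERDICT (by name: the statement is the Claim_ definition above) =====
theorem get_medal_spec : Claim_equal_get_medal := by
  intro mmr _
  unfold Spec_get_medal get_medal get_medal_alt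
  by_cases h1 : mmr < 800 <;> by_cases h2 : mmr < 1000 <;> by_cases h3 : mmr < 1200 <;>
    by_cases h4 : mmr < 1500 <;> by_cases h5 : mmr < 1800 <;> by_cases h6 : mmr < 2200 <;>
    by_cases h7 : mmr < 2600 <;>
    first
    | omega
    | simp [pvScanA, pvTiersA, pvThresholdsB, pvNamesB, PySem.List.bisectRight, PySem.List.bisectRightLoop, h1, h2, h3, h4, h5, h6, h7]
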